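-- pv_equiv track=rewrite | github.com/nihzm/EvaluationFrameworkForNAQuantumCompilers | compilers/Parallax/run.py | _placeOnSquareGrid
-- ===== SOURCE A (Python) =====
-- def _placeOnSquareGrid(numQubits: int, width: int, height: int):
--     """
--     Place qubits on a simple square grid layout, row by row.
--     Returns a list of (x, y) integer coordinate tuples.
--     """
--     import math
--     cols = math.ceil(math.sqrt(numQubits))
--     positions = []
--     for i in range(numQubits):
--         x = i % cols
--         y = i // cols
--         if x >= width or y >= height:
--             raise ValueError(f"Not enough room on {width}x{height} grid for {numQubits} qubits")
--         positions.append((x, y))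
--     return positions
-- ===== SOURCE B (Python) =====
-- def _placeOnSquareGrid(numQubits: int, width: int, height: int):
--     """
--     Place qubits on a square grid: one O(1) closed-form fit check, then build the
--     layout as a block of full rows plus a remainder row (no per-cell divmod/check).
--     """
--     import math
--     if numQubits == 0:
--         return []
--     c = math.isqrt(numQubits)  # raises ValueError on negative input, like math.sqrt
--     cols = c if c * c == numQubits else c + 1
--     rows = -(-numQubits // cols)
--     if cols > width or rows > height:
--         raise ValueError(f"Not enough room on {width}x{height} grid for {numQubits} qubits")
--     full, rem = divmod(numQubits, cols)
--     positions = [(x, y) for y in range(full) for x in range(cols)]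
--     positions += [(x, full) for x in range(rem)]
--     return positions
-- ===== Notes on version B (the rewrite author's own statement) =====
-- stated objective: alternative
-- what changed: A loops over every index i computing i%cols and i//cols and re-checking the bounds per cell; B does a single O(1) closed-form feasibility check (cols > width or ceil(n/cols) > height) and then constructs the layout as a block of full rows plus one remainder row via comprehensions, with no per-element division, modulo or bounds check.
import Mathlib
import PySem

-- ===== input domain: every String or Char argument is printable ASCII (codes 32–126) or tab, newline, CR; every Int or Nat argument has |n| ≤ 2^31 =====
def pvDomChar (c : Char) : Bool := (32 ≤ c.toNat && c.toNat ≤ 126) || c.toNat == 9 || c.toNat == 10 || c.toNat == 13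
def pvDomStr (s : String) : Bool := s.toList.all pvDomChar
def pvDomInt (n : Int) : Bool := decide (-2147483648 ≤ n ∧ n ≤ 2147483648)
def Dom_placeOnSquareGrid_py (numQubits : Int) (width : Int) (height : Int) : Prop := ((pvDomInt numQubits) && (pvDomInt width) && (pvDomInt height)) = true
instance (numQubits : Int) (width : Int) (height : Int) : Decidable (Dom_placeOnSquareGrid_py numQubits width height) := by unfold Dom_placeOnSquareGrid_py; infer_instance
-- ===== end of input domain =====

-- B replaces A's per-index loop (divmod + per-cell bounds check) by one closed-form fit
-- check plus a block construction: full rows, then a remainder row; objective: alternative.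

-- ===== PORT A =====
-- integer square root, binary recursion isqrt(n) = fix-up of 2*isqrt(n/4); the fuel (first
-- argument) only forces structural recursion — pvIsqrt n n is exact since n/4 reaches 0
-- within n steps
def pvIsqrt : Nat → Nat → Nat
  | 0, _ => 0
  | fuel + 1, n =>
    if n = 0 then 0
    else
      let r := 2 * pvIsqrt fuel (n / 4)
      if (r + 1) * (r + 1) ≤ n then r + 1 else r

-- math.ceil(math.sqrt(m)) ported as the exact integer ceiling square root: exact on the
-- stated domain (m ≤ 2^31, where the double sqrt is correctly rounded, so its ceil is the
-- exact ceiling square root).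
def pvCeilSqrtNat (m : Nat) : Nat :=
  if pvIsqrt m m * pvIsqrt m m = m then pvIsqrt m m else pvIsqrt m m + 1

def placeOnSquareGrid_py (numQubits : Int) (width : Int) (height : Int) : List (Int × Int) :=
  -- cols = math.ceil(math.sqrt(numQubits)); negative numQubits raises ValueError (excluded by Pre_)
  let cols : Int := (pvCeilSqrtNat numQubits.toNat : Int)
  -- for i in range(numQubits): x = i % cols; y = i // cols; positions.append((x, y))
  --   the 'x >= width or y >= height' branch raises ValueError — excluded by Pre_
  (PySem.List.pyRange 0 numQubits 1).foldl
    (fun positions i =>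
      let x := PySem.Int.mod i cols
      let y := PySem.Int.floordiv i cols
      positions ++ [(x, y)]) []

-- ===== PORT B =====
-- Source B's '[(x, y) for y in range(full) for x in range(cols)]'
def pvFullRows (full cols : Nat) : List (Int × Int) :=
  (List.range full).flatMap (fun y : Nat => (List.range cols).map (fun x : Nat => ((x : Int), (y : Int))))

def placeOnSquareGrid_py_alt (numQubits : Int) (width : Int) (height : Int) : List (Int × Int) :=
  if numQubits = 0 then []
  else
    -- c = math.isqrt(numQubits) (ValueError on negative input — excluded by Pre_);
    -- cols = c if c*c == numQubits else c + 1
    let c := pvIsqrt numQubits.toNat numQubits.toNat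
    let cols := if c * c = numQubits.toNat then c else c + 1
    -- the 'cols > width or rows > height' raise is excluded by Pre_
    let full := numQubits.toNat / cols
    let rem := numQubits.toNat % cols
    pvFullRows full cols ++ (List.range rem).map (fun x : Nat => ((x : Int), (full : Int)))

-- ===== PRECONDITION & SPEC =====
-- Pre_ excludes exactly the inputs on which the Python A raises ValueError: negative
-- numQubits (math.sqrt domain error) and grids too small for the requested qubits (the
-- explicit raise); B raises ValueError on exactly the same inputs, so nothing returnable
-- is excluded. The fit condition is closed-form in c = ceil(sqrt(numQubits)) (the number
-- of columns): the grid fits iff c ≤ width and the last row index (n-1)//c is below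
-- height, i.e. n - 1 < height * c.
def Pre_placeOnSquareGrid_py (numQubits : Int) (width : Int) (height : Int) : Prop :=
  0 ≤ numQubits ∧
  (numQubits = 0 ∨
    ((pvCeilSqrtNat numQubits.toNat : Int) ≤ width ∧
      numQubits - 1 < height * (pvCeilSqrtNat numQubits.toNat : Int)))
instance (numQubits : Int) (width : Int) (height : Int) : Decidable (Pre_placeOnSquareGrid_py numQubits width height) := by unfold Pre_placeOnSquareGrid_py; infer_instance

def pvWitness_placeOnSquareGrid_py : Int × Int × Int := (5, 3, 2)

def Spec_placeOnSquareGrid_py (numQubits : Int) (width : Int) (height : Int) (out : List (Int × Int)) : Prop := out = placeOnSquareGrid_py_alt numQubits width height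
instance (numQubits : Int) (width : Int) (height : Int) (out : List (Int × Int)) : Decidable (Spec_placeOnSquareGrid_py numQubits width height out) := by unfold Spec_placeOnSquareGrid_py; infer_instance

-- ===== CLAIM (what is proved, stated in full; the proofs are below) =====
def Claim_equal_placeOnSquareGrid_py : Prop := ∀ (numQubits : Int) (width : Int) (height : Int), Dom_placeOnSquareGrid_py numQubits width height → Pre_placeOnSquareGrid_py numQubits width height → Spec_placeOnSquareGrid_py numQubits width height (placeOnSquareGrid_py numQubits width height)

-- ===== LEMMAS AND PROOFS =====

-- the row-major divmod coordinate of cell i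
def pvDm (C i : Nat) : Int × Int := (((i % C : Nat) : Int), ((i / C : Nat) : Int))

lemma pvDm_add_mul (C f x : Nat) (hC : 0 < C) (hx : x < C) :
    pvDm C (f * C + x) = ((x : Int), (f : Int)) := by
  unfold pvDm
  have h1 : (f * C + x) % C = x := by
    rw [Nat.add_comm, Nat.add_mul_mod_self_right, Nat.mod_eq_of_lt hx]
  have h2 : (f * C + x) / C = f := by
    rw [Nat.add_comm, Nat.add_mul_div_right _ _ hC, Nat.div_eq_of_lt hx, Nat.zero_add]
  rw [h1, h2]

-- A's divmod coordinates of the first f*C cells are exactly B's f full rows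
lemma pvBlock (C : Nat) (hC : 0 < C) :
    ∀ f, (List.range (f * C)).map (pvDm C) = pvFullRows f C := by
  intro f
  induction f with
  | zero => simp [pvFullRows]
  | succ f ih =>
    rw [Nat.succ_mul, List.range_add, List.map_append, ih]
    unfold pvFullRows
    rw [List.range_succ, List.flatMap_append]
    congr 1
    simp only [List.flatMap_cons, List.flatMap_nil, List.append_nil, List.map_map]
    refine List.map_eq_map_iff.mpr ?_
    intro x hx
    exact pvDm_add_mul C f x hC (List.mem_range.mp hx)

-- splitting the first m divmod coordinates into full rows plus the remainder row
lemma pvSplit (C m : Nat) (hC : 0 < C) :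
    (List.range m).map (pvDm C)
      = pvFullRows (m / C) C
        ++ (List.range (m % C)).map (fun x : Nat => ((x : Int), ((m / C : Nat) : Int))) := by
  calc (List.range m).map (pvDm C)
      = (List.range (m / C * C + m % C)).map (pvDm C) := by rw [Nat.div_add_mod']
    _ = _ := by
        rw [List.range_add, List.map_append, pvBlock C hC]
        congr 1
        rw [List.map_map]
        refine List.map_eq_map_iff.mpr ?_
        intro x hx
        exact pvDm_add_mul C (m / C) x hC
          (lt_of_lt_of_le (List.mem_range.mp hx) (Nat.mod_lt m hC).le)

-- A's fold over range(numQubits) is a map of divmod coordinates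
lemma pvA_normal (n : Int) (w h : Int) :
    placeOnSquareGrid_py n w h
      = (List.range n.toNat).map (pvDm (pvCeilSqrtNat n.toNat)) := by
  unfold placeOnSquareGrid_py
  rw [PySem.List.pyRange_one, PySem.List.foldl_append_singleton_eq_map, List.nil_append,
    List.map_map]
  simp only [Int.sub_zero]
  refine List.map_eq_map_iff.mpr ?_
  intro i _
  simp [pvDm, PySem.Int.mod_natCast, PySem.Int.floordiv_natCast]

-- ===== VERDICT (by name: the statement is the Claim_ definition above) =====
theorem placeOnSquareGrid_py_spec : Claim_equal_placeOnSquareGrid_py := by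
  intro n w h _ hpre
  obtain ⟨hn, -⟩ := hpre
  unfold Spec_placeOnSquareGrid_py
  rw [pvA_normal n]
  unfold placeOnSquareGrid_py_alt
  by_cases hz : n = 0
  · simp [hz]
  · rw [if_neg hz]
    have hm : n.toNat ≠ 0 := by omega
    clear hn
    have hC : 0 < pvCeilSqrtNat n.toNat := by
      unfold pvCeilSqrtNat
      split
      · rename_i hsq
        rcases Nat.eq_zero_or_pos (pvIsqrt n.toNat n.toNat) with h0 | h0
        · rw [h0] at hsq; omega
        · exact h0
      · omega
    have hcols : (if pvIsqrt n.toNat n.toNat * pvIsqrt n.toNat n.toNat = n.toNat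
        then pvIsqrt n.toNat n.toNat else pvIsqrt n.toNat n.toNat + 1) = pvCeilSqrtNat n.toNat := rfl
    simp only [hcols]
    exact pvSplit (pvCeilSqrtNat n.toNat) n.toNat hC
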